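-- pv_equiv track=rewrite | github.com/whynotsw-camp/wh06-3rd-Uhok | uhok-backend/services/recipe/routers/recipe_router.py | _expand_variants
-- ===== SOURCE A (Python) =====
-- from typing import List, Optional, Dict, Set, Any
--
-- def _expand_variants(core: List[str], variants: Dict[str, List[str]]) -> List[str]:
--     out: List[str] = []
--     seen = set()
--     for k in core:
--         if k not in seen:
--             out.append(k); seen.add(k)
--         for v in variants.get(k, []):
--             if v not in seen:
--                 out.append(v); seen.add(v)
--     return out
-- ===== SOURCE B (Python) =====
-- def _expand_variants(core, variants):
--     flat = [x for k in core for x in [k] + variants.get(k, [])]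
--     return [x for i, x in enumerate(flat) if x not in flat[:i]]
-- ===== Notes on version B (the rewrite author's own statement) =====
-- stated objective: alternative
-- what changed: Replaced A's single interleaved pass with a mutable seen-set by a two-phase, stateless algorithm: one comprehension flattens each key with its variants, then each element is kept iff it does not occur in the prefix of the flat list before its own position (index-based prefix-membership dedup, no auxiliary set or dict); trades A's O(n) hash-set pass for an O(n^2) but state-free formulation.
import Mathlib
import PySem

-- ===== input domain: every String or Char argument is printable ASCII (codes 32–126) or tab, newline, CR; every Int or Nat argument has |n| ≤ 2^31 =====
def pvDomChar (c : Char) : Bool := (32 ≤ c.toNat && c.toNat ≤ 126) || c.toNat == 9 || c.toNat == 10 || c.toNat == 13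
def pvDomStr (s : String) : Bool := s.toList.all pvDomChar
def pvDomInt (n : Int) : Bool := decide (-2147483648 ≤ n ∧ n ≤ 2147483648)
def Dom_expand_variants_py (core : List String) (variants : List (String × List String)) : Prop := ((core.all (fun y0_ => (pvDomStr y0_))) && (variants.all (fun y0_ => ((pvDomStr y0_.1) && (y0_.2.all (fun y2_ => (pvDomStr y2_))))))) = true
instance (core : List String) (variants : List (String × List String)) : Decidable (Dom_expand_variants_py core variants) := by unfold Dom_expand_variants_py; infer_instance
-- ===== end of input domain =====

-- B flattens each key with its variants, then keeps an element iff it is absent from the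
-- prefix of the flat list before its position: a stateless two-phase alternative to A's
-- single interleaved pass with a mutable seen-set (O(n^2) instead of O(n), no auxiliary state).
-- ===== PORT A =====
-- Literal port of A: one pass over core, appending k then each variant when unseen.
def expand_variants_py (core : List String) (variants : List (String × List String)) : List String :=
  (core.foldl
    (fun (st : List String × PySem.Set String) k =>
      let st1 := if st.2.contains k then st else (st.1 ++ [k], PySem.Set.add st.2 k)
      (PySem.Dict.getD (PySem.Dict.mk variants) k []).foldl
        (fun (st2 : List String × PySem.Set String) v =>
          if st2.2.contains v then st2 else (st2.1 ++ [v], PySem.Set.add st2.2 v)) st1)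
    ([], PySem.Set.empty)).1

-- ===== PORT B =====
-- Port of B: flatten [k] + variants.get(k, []), then keep x at index i iff x not in flat[:i].
def expand_variants_py_alt (core : List String) (variants : List (String × List String)) : List String :=
  let flat := core.flatMap (fun k => [k] ++ PySem.Dict.getD (PySem.Dict.mk variants) k [])
  ((PySem.List.enumerate flat).filter
      (fun p => !(decide (p.2 ∈ PySem.List.slice flat none (some p.1))))).map (·.2)

-- ===== PRECONDITION & SPEC =====
def Spec_expand_variants_py (core : List String) (variants : List (String × List String)) (out : List String) : Prop := out = expand_variants_py_alt core variants
instance (core : List String) (variants : List (String × List String)) (out : List String) : Decidable (Spec_expand_variants_py core variants out) := by unfold Spec_expand_variants_py; infer_instance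

-- ===== CLAIM (what is proved, stated in full; the proofs are below) =====
def Claim_equal_expand_variants_py : Prop := ∀ (core : List String) (variants : List (String × List String)), Dom_expand_variants_py core variants → Spec_expand_variants_py core variants (expand_variants_py core variants)

-- ===== LEMMAS AND PROOFS =====

-- A's loop body as a named step function.
def pvStep (st : List String × PySem.Set String) (x : String) : List String × PySem.Set String :=
  if st.2.contains x then st else (st.1 ++ [x], PySem.Set.add st.2 x)

theorem pvStep_diag (o : List String) (x : String) :
    pvStep (o, o) x = (PySem.Set.add o x, PySem.Set.add o x) := by
  by_cases h : x ∈ o <;> simp [pvStep, PySem.Set.add, PySem.Set.contains, h]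

theorem pv_step_fold (l : List String) (o : List String) :
    l.foldl pvStep (o, o) = (l.foldl PySem.Set.add o, l.foldl PySem.Set.add o) := by
  induction l generalizing o with
  | nil => rfl
  | cons x xs ih => simp only [List.foldl_cons, pvStep_diag]; exact ih _

-- A's nested loop over core is the fold of Set.add over the flattened candidate list.
theorem pv_main (core : List String) (g : String → List String) (o : List String) :
    (core.foldl (fun st k => (g k).foldl pvStep (pvStep st k)) (o, o)).1
    = core.foldl (fun acc k => (k :: g k).foldl PySem.Set.add acc) o := by
  induction core generalizing o with
  | nil => rfl
  | cons k ks ih =>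
    simp only [List.foldl_cons, pvStep_diag, pv_step_fold]
    exact ih _

-- B's prefix-membership filter computes set(xs) in first-occurrence order.
theorem pv_prefix_filter (l : List String) :
    ((PySem.List.enumerate l).filter
        (fun p => !(decide (p.2 ∈ PySem.List.slice l none (some p.1))))).map (·.2)
      = PySem.Set.ofList l := by
  induction l using List.reverseRecOn with
  | nil => rfl
  | append_singleton l y ih =>
    rw [PySem.Set.ofList_eq_foldl, List.foldl_append, ← PySem.Set.ofList_eq_foldl]
    have henum : PySem.List.enumerate (l ++ [y]) 0
        = PySem.List.enumerate l 0 ++ [((l.length : Int), y)] := by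
      rw [PySem.List.enumerate_append]; simp [PySem.List.enumerate_cons, PySem.List.enumerate_nil]
    rw [henum, List.filter_append, List.map_append]
    have hcongr : (PySem.List.enumerate l 0).filter
        (fun p => !(decide (p.2 ∈ PySem.List.slice (l ++ [y]) none (some p.1))))
        = (PySem.List.enumerate l 0).filter
        (fun p => !(decide (p.2 ∈ PySem.List.slice l none (some p.1)))) := by
      apply List.filter_congr
      intro p hp
      rcases (PySem.List.mem_enumerate_iff l 0 p).1 hp with ⟨k, hk, rfl⟩
      simp only [zero_add, PySem.List.slice_to_natCast,
        List.take_append_of_le_length (le_of_lt hk)]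
    rw [hcongr, ih]
    have hlast : (([((l.length : Int), y)]).filter
        (fun p => !(decide (p.2 ∈ PySem.List.slice (l ++ [y]) none (some p.1))))).map
          (fun p : Int × String => p.2)
        = if y ∈ l then [] else [y] := by
      simp only [List.filter, PySem.List.slice_to_natCast, List.take_left]
      by_cases h : y ∈ l <;> simp [h]
    rw [hlast]
    by_cases h : y ∈ l
    · simp [PySem.Set.add, PySem.Set.contains, PySem.Set.mem_ofList, h]
    · simp [PySem.Set.add, PySem.Set.contains, PySem.Set.mem_ofList, h]

-- ===== VERDICT (by name: the statement is the Claim_ definition above) =====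
theorem expand_variants_py_spec : Claim_equal_expand_variants_py := by
  intro core variants _
  unfold Spec_expand_variants_py expand_variants_py expand_variants_py_alt
  rw [pv_prefix_filter]
  rw [PySem.Set.ofList_eq_foldl, List.foldl_flatMap]
  exact pv_main core (fun k => PySem.Dict.getD (PySem.Dict.mk variants) k []) []
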